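-- pv_equiv track=rewrite | github.com/AdityaJain1030/K4-free-graph-constructions | search/circulant_fast.py | _has_k4
-- ===== SOURCE A (Python) =====
-- def _has_k4(S_full: frozenset[int], n: int) -> bool:
--     """
--     K4 in C(n, S_full) ⟺ triangle in the "difference graph" on S_full
--     (edges (a, b) with a-b ∈ S_full). O(|S_full|^3) with early-exit.
--     """
--     S_sorted = sorted(S_full)
--     L = len(S_sorted)
--     if L < 3:
--         return False
--     for i in range(L):
--         a = S_sorted[i]
--         for j in range(i + 1, L):
--             b = S_sorted[j]
--             if (b - a) % n not in S_full:
--                 continue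
--             for k in range(j + 1, L):
--                 c = S_sorted[k]
--                 if (c - a) % n in S_full and (c - b) % n in S_full:
--                     return True
--     return False
-- ===== SOURCE B (Python) =====
-- def _has_k4(S_full, n):
--     # Bitset re-implementation: one mask of "later neighbours" per vertex,
--     # built for i = L-1 down to 0; right after building row i, any edge (i, j)
--     # with a common later neighbour is detected by one integer AND of the two
--     # masks (rows for j > i are already available).
--     S_sorted = sorted(S_full)
--     L = len(S_sorted)
--     if L < 3:
--         return False
--     Sset = set(S_full)
--     adj = [0] * L
--     for i in range(L - 1, -1, -1):
--         a = S_sorted[i]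
--         m = 0
--         for j in range(i + 1, L):
--             if (S_sorted[j] - a) % n in Sset:
--                 m |= 1 << j
--         adj[i] = m
--         for j in range(i + 1, L):
--             if m >> j & 1 and m & adj[j]:
--                 return True
--     return False
-- ===== Notes on version B (the rewrite author's own statement) =====
-- stated objective: alternative
-- what changed: Replaces the O(L^3) triple nested scan by per-vertex later-neighbour bitmasks built in descending vertex order: a common neighbour of an edge is detected with one integer AND of two masks instead of an inner element loop.
-- outside the precondition, e.g. on _has_k4({1, 2, 3}, 0): A raises ZeroDivisionError, B raises ZeroDivisionError
import Mathlib
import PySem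

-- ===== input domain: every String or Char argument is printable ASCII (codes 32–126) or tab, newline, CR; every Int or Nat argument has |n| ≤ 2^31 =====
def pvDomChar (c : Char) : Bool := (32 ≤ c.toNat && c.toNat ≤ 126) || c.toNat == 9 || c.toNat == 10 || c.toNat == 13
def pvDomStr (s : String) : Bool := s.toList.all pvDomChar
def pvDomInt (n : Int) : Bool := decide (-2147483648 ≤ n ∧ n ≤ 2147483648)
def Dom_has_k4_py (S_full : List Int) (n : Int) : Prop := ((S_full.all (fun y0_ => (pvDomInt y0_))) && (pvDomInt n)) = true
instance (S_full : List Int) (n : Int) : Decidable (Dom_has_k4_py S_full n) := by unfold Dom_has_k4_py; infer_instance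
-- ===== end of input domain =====

-- B replaces A's triple nested scan by per-vertex later-neighbour bitmasks
-- (rows built in descending vertex order, one integer AND per candidate edge);
-- an alternative algorithm of similar cost, not claimed faster.


-- ===== PORT A =====
-- range(L)/range(i+1,L) over Nat indices (exact: all bounds are nonnegative);
-- S_sorted[i] as getD (indices are always in range); frozenset membership as
-- List.contains on the distinct-element list; early 'return True' as .any.
def has_k4_py (S_full : List Int) (n : Int) : Bool :=
  let S_sorted := PySem.List.sorted S_full id
  let L := S_sorted.length
  if L < 3 then false
  else
    (List.range L).any fun i =>
      let a := S_sorted.getD i 0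
      (List.range' (i+1) (L - (i+1))).any fun j =>
        let b := S_sorted.getD j 0
        if ¬ (S_full.contains (PySem.Int.mod (b - a) n) = true) then false
        else
          (List.range' (j+1) (L - (j+1))).any fun k =>
            let c := S_sorted.getD k 0
            S_full.contains (PySem.Int.mod (c - a) n) &&
              S_full.contains (PySem.Int.mod (c - b) n)

-- ===== PORT B =====
-- Source B's loop 'for i in range(L-1, -1, -1)' with early 'return True' and the
-- mutable list 'adj' becomes structural recursion on c = i+1 carrying adj;
-- masks are nonnegative Python ints → Nat; 'adj[i] = m' is List.set;
-- 'm >> j & 1' is testBit; 'x and y' truthiness on ints is '… && (… != 0)'.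
def altGo (E : Nat → Nat → Bool) (L : Nat) : Nat → List Nat → Bool
  | 0, _ => false
  | c+1, adj =>
      let i := c
      let m := (List.range' (i+1) (L - (i+1))).foldl
        (fun m j => if E i j then m ||| (1 <<< j) else m) 0
      let adj' := adj.set i m
      if (List.range' (i+1) (L - (i+1))).any
          (fun j => m.testBit j && ((m &&& adj'.getD j 0) != 0))
      then true
      else altGo E L c adj'

def has_k4_py_alt (S_full : List Int) (n : Int) : Bool :=
  let S_sorted := PySem.List.sorted S_full id
  let L := S_sorted.length
  if L < 3 then false
  else
    altGo
      (fun i j => S_full.contains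
        (PySem.Int.mod (S_sorted.getD j 0 - S_sorted.getD i 0) n))
      L L (List.replicate L 0)

-- ===== PRECONDITION & SPEC =====
-- Pre_ excludes n = 0 when there are ≥ 3 elements: there Python's '%' raises
-- ZeroDivisionError (with < 3 elements A returns False before any '%').
def Pre_has_k4_py (S_full : List Int) (n : Int) : Prop :=
  n ≠ 0 ∨ S_full.length < 3
instance (S_full : List Int) (n : Int) : Decidable (Pre_has_k4_py S_full n) := by
  unfold Pre_has_k4_py; infer_instance
def pvWitness_has_k4_py : List Int × Int := ([1, 2, 3], 7)
def Spec_has_k4_py (S_full : List Int) (n : Int) (out : Bool) : Prop := out = has_k4_py_alt S_full n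
instance (S_full : List Int) (n : Int) (out : Bool) : Decidable (Spec_has_k4_py S_full n out) := by unfold Spec_has_k4_py; infer_instance

-- ===== CLAIM (what is proved, stated in full; the proofs are below) =====
def Claim_equal_has_k4_py : Prop := ∀ (S_full : List Int) (n : Int), Dom_has_k4_py S_full n → Pre_has_k4_py S_full n → Spec_has_k4_py S_full n (has_k4_py S_full n)

-- ===== LEMMAS AND PROOFS =====

-- the later-neighbour mask of row i (proof-side name for the fold in both B's rows)
def pvMask (E : Nat → Nat → Bool) (L i : Nat) : Nat :=
  (List.range' (i+1) (L - (i+1))).foldl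
    (fun m j => if E i j then m ||| (1 <<< j) else m) 0

-- the common triangle predicate both ports decide
def pvP (E : Nat → Nat → Bool) (L : Nat) : Prop :=
  ∃ i, i < L ∧ ∃ j, i+1 ≤ j ∧ j < L ∧ E i j = true ∧
    ∃ k, j+1 ≤ k ∧ k < L ∧ E i k = true ∧ E j k = true

theorem mask_testBit (p : Nat → Bool) (a b m0 t : Nat) :
    ((List.range' a b).foldl (fun m j => if p j then m ||| (1 <<< j) else m) m0).testBit t
      = (m0.testBit t || ((List.range' a b).contains t && p t)) := by
  induction b generalizing a m0 with
  | zero => simp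
  | succ b ih =>
      rw [List.range'_succ]
      simp only [List.foldl_cons, ih]
      by_cases ht : t = a
      · subst ht
        by_cases hp : p t <;>
          simp [hp, Nat.testBit_or, Nat.one_shiftLeft]
      · have ht' : a ≠ t := fun h => ht h.symm
        by_cases hp : p a <;>
          simp [hp, ht, ht', Nat.testBit_or, Nat.one_shiftLeft]

theorem and_ne_zero_iff (x y : Nat) :
    ((x &&& y) ≠ 0) ↔ ∃ t, x.testBit t ∧ y.testBit t := by
  constructor
  · intro h
    obtain ⟨t, ht⟩ := Nat.exists_testBit_of_ne_zero h
    exact ⟨t, by simpa [Nat.testBit_and] using ht⟩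
  · rintro ⟨t, hx, hy⟩ h0
    have : (x &&& y).testBit t = false := by simp [h0]
    simp [Nat.testBit_and, hx, hy] at this

theorem pvMask_testBit (E : Nat → Nat → Bool) (L i t : Nat) :
    (pvMask E L i).testBit t = ((List.range' (i+1) (L - (i+1))).contains t && E i t) := by
  unfold pvMask
  simpa using mask_testBit (E i) (i+1) (L - (i+1)) 0 t

theorem contains_range'_iff (i t L : Nat) (hi : i < L) :
    ((List.range' (i+1) (L - (i+1))).contains t = true ↔ (i+1 ≤ t ∧ t < L)) := by
  simp only [List.contains_iff_mem, List.mem_range'_1]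
  omega

theorem ite_not_false (c X : Bool) : (if ¬ (c = true) then false else X) = (c && X) := by
  cases c <;> simp

-- A's triple loop decides pvP
theorem pv_A_iff (E : Nat → Nat → Bool) (L : Nat) :
    (((List.range L).any fun i =>
        (List.range' (i+1) (L - (i+1))).any fun j =>
          if ¬ (E i j = true) then false
          else (List.range' (j+1) (L - (j+1))).any fun k => E i k && E j k) = true)
      ↔ pvP E L := by
  unfold pvP
  simp only [List.any_eq_true, List.mem_range, List.mem_range'_1, ite_not_false,
    Bool.and_eq_true]
  constructor
  · rintro ⟨i, hi, j, ⟨hj1, hj2⟩, hEij, k, ⟨hk1, hk2⟩, hEik, hEjk⟩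
    exact ⟨i, hi, j, hj1, by omega, hEij, k, hk1, by omega, hEik, hEjk⟩
  · rintro ⟨i, hi, j, hj1, hj2, hEij, k, hk1, hk2, hEik, hEjk⟩
    exact ⟨i, hi, j, ⟨hj1, by omega⟩, hEij, k, ⟨hk1, by omega⟩, hEik, hEjk⟩

-- the mask-pair formulation is the same predicate
theorem pv_pair_iff (E : Nat → Nat → Bool) (L : Nat) :
    (∃ i, i < L ∧ ∃ j, i+1 ≤ j ∧ j < L ∧ (pvMask E L i).testBit j = true ∧
        (pvMask E L i &&& pvMask E L j) ≠ 0)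
      ↔ pvP E L := by
  unfold pvP
  constructor
  · rintro ⟨i, hi, j, hj1, hj2, htb, hne⟩
    rw [pvMask_testBit, Bool.and_eq_true, contains_range'_iff i j L hi] at htb
    obtain ⟨t, h1, h2⟩ := (and_ne_zero_iff _ _).mp hne
    rw [pvMask_testBit, Bool.and_eq_true, contains_range'_iff i t L hi] at h1
    rw [pvMask_testBit, Bool.and_eq_true, contains_range'_iff j t L hj2] at h2
    exact ⟨i, hi, j, hj1, hj2, htb.2, t, h2.1.1, h2.1.2, h1.2, h2.2⟩
  · rintro ⟨i, hi, j, hj1, hj2, hEij, k, hk1, hk2, hEik, hEjk⟩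
    refine ⟨i, hi, j, hj1, hj2, ?_, ?_⟩
    · rw [pvMask_testBit, Bool.and_eq_true, contains_range'_iff i j L hi]
      exact ⟨⟨hj1, hj2⟩, hEij⟩
    · refine (and_ne_zero_iff _ _).mpr ⟨k, ?_, ?_⟩
      · rw [pvMask_testBit, Bool.and_eq_true, contains_range'_iff i k L hi]
        exact ⟨⟨by omega, hk2⟩, hEik⟩
      · rw [pvMask_testBit, Bool.and_eq_true, contains_range'_iff j k L hj2]
        exact ⟨⟨hk1, hk2⟩, hEjk⟩

-- the invariant of B's descending loop
theorem altGo_spec (E : Nat → Nat → Bool) (L : Nat) :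
    ∀ (c : Nat) (adj : List Nat), c ≤ L → adj.length = L →
      (∀ j, c ≤ j → j < L → adj.getD j 0 = pvMask E L j) →
      (altGo E L c adj = true ↔
        ∃ i, i < c ∧ ∃ j, i+1 ≤ j ∧ j < L ∧ (pvMask E L i).testBit j = true ∧
          (pvMask E L i &&& pvMask E L j) ≠ 0) := by
  intro c
  induction c with
  | zero => intro adj _ _ _; simp [altGo]
  | succ c ih =>
      intro adj hcL hlen hinv
      have hcL' : c < L := by omega
      have hm : (List.range' (c+1) (L - (c+1))).foldl
          (fun m j => if E c j then m ||| (1 <<< j) else m) 0 = pvMask E L c := rfl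
      have hinv' : ∀ j, c ≤ j → j < L →
          (adj.set c (pvMask E L c)).getD j 0 = pvMask E L j := by
        intro j hj1 hj2
        rcases Nat.eq_or_lt_of_le hj1 with hj | hj
        · subst hj
          rw [List.getD_eq_getElem?_getD, List.getElem?_set_self (by omega)]
          simp
        · rw [List.getD_eq_getElem?_getD, List.getElem?_set_ne (by omega)]
          rw [← List.getD_eq_getElem?_getD]
          exact hinv j (by omega) hj2
      rw [altGo]
      simp only [hm]
      by_cases hfind : ((List.range' (c+1) (L - (c+1))).any
          (fun j => (pvMask E L c).testBit j &&
            ((pvMask E L c &&& (adj.set c (pvMask E L c)).getD j 0) != 0))) = true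
      · rw [if_pos hfind]
        simp only [true_iff]
        simp only [List.any_eq_true, List.mem_range'_1, Bool.and_eq_true, bne_iff_ne,
          ne_eq] at hfind
        obtain ⟨j, ⟨hj1, hj2⟩, htb, hne⟩ := hfind
        have hjL : j < L := by omega
        rw [hinv' j (by omega) hjL] at hne
        exact ⟨c, by omega, j, hj1, hjL, htb, hne⟩
      · rw [if_neg hfind]
        rw [ih (adj.set c (pvMask E L c)) (by omega) (by simpa using hlen) hinv']
        simp only [List.any_eq_true, List.mem_range'_1, Bool.and_eq_true, bne_iff_ne,
          ne_eq] at hfind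
        push Not at hfind
        constructor
        · rintro ⟨i, hi, rest⟩
          exact ⟨i, by omega, rest⟩
        · rintro ⟨i, hi, j, hj1, hj2, htb, hne⟩
          rcases Nat.lt_succ_iff_lt_or_eq.mp hi with hi' | hi'
          · exact ⟨i, hi', j, hj1, hj2, htb, hne⟩
          · subst hi'
            have hjL : j < i + 1 + (L - (i+1)) := by omega
            have := hfind j ⟨hj1, hjL⟩ htb
            rw [hinv' j (by omega) hj2] at this
            exact absurd this (by simpa using hne)

theorem has_k4_py_spec : Claim_equal_has_k4_py := by
  intro S_full n _ _
  unfold Spec_has_k4_py has_k4_py has_k4_py_alt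
  dsimp only
  by_cases h3 : (PySem.List.sorted S_full id).length < 3
  · rw [if_pos h3, if_pos h3]
  · rw [if_neg h3, if_neg h3]
    set E : Nat → Nat → Bool := fun i j => S_full.contains
      (PySem.Int.mod ((PySem.List.sorted S_full id).getD j 0 -
        (PySem.List.sorted S_full id).getD i 0) n) with hE
    set L := (PySem.List.sorted S_full id).length with hL
    rw [Bool.eq_iff_iff]
    rw [pv_A_iff E L, altGo_spec E L L (List.replicate L 0) (le_refl L)
      (by simp) (by intro j h1 h2; omega)]
    exact (pv_pair_iff E L).symm
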